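-- pv_equiv track=rewrite | github.com/SravanUgge/pythoncoding | coding questions/sum XOR.py | SUMXOR
-- ===== SOURCE A (Python) =====
-- def SUMXOR(A,N):
--     result=0
--     sum=0
--     for i in range(N):
--         if i%2==0:
--             result=result^A[i]
--         else:
--             sum+=A[i]
--     return sum-result
-- ===== SOURCE B (Python) =====
-- def SUMXOR(A, N):
--     prefix = A[:max(0, N)]
--     it = iter(prefix)
--     x = s = 0
--     for a, b in zip(it, it):
--         x ^= a
--         s += b
--     if len(prefix) % 2:
--         x ^= prefix[-1]
--     return s - x
-- ===== Notes on version B (the rewrite author's own statement) =====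
-- stated objective: alternative
-- what changed: Instead of an index loop over range(N) branching on i % 2, B slices off the first N elements and traverses them pairwise with zip(it, it), XOR-ing the first and summing the second of each (even, odd) pair, with one leftover element folded into the XOR; no per-element parity test or index arithmetic remains.
import Mathlib
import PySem

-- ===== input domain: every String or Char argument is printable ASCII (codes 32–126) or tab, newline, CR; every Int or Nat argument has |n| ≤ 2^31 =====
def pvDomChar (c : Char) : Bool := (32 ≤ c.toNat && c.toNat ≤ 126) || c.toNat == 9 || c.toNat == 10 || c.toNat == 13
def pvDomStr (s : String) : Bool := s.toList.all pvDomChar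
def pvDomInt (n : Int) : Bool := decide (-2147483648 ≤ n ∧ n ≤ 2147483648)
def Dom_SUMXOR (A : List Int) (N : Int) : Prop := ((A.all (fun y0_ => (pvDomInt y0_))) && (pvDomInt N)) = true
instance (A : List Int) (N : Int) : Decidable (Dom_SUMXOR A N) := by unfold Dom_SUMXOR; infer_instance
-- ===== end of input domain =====

-- B replaces the index loop with parity branching by one pairwise pass: it chunks the first N elements into (even,odd) pairs (Python zip(it,it)), XORs firsts and sums seconds, handling one leftover element; same cost, different traversal.


-- ===== PORT A =====
def SUMXOR (A : List Int) (N : Int) : Int :=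
  let st := (PySem.List.pyRange 0 N 1).foldl
    (fun (p : Int × Int) i =>
      if PySem.Int.mod i 2 == 0 then (PySem.Int.bxor p.1 (PySem.List.pyGetD A i 0), p.2)
      else (p.1, p.2 + PySem.List.pyGetD A i 0)) (0, 0)
  st.2 - st.1

-- ===== PORT B =====
-- zip(it, it) over one iterator = consecutive non-overlapping pairs (exact: leftover element dropped)
def pvPairs : List Int → List (Int × Int)
  | a :: b :: t => (a, b) :: pvPairs t
  | _ => []

def SUMXOR_alt (A : List Int) (N : Int) : Int :=
  let pre := PySem.List.slice A none (some (max 0 N))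
  let st := (pvPairs pre).foldl
    (fun (p : Int × Int) ab => (PySem.Int.bxor p.1 ab.1, p.2 + ab.2)) (0, 0)
  -- prefix[-1] is only read when len(prefix) is odd (so prefix ≠ []); pyGetD's default is never used there
  let x := if PySem.Int.mod (pre.length : Int) 2 ≠ 0 then PySem.Int.bxor st.1 (PySem.List.pyGetD pre (-1) 0) else st.1
  st.2 - x

-- ===== PRECONDITION & SPEC =====
-- Pre_ excludes exactly the inputs where Python's A[i] raises IndexError: N > len(A).
def Pre_SUMXOR (A : List Int) (N : Int) : Prop := N ≤ (A.length : Int)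
instance (A : List Int) (N : Int) : Decidable (Pre_SUMXOR A N) := by unfold Pre_SUMXOR; infer_instance
def pvWitness_SUMXOR : List Int × Int := ([1, 2, 3], 3)

def Spec_SUMXOR (A : List Int) (N : Int) (out : Int) : Prop := out = SUMXOR_alt A N
instance (A : List Int) (N : Int) (out : Int) : Decidable (Spec_SUMXOR A N out) := by unfold Spec_SUMXOR; infer_instance

-- ===== CLAIM (what is proved, stated in full; the proofs are below) =====
def Claim_equal_SUMXOR : Prop := ∀ (A : List Int) (N : Int), Dom_SUMXOR A N → Pre_SUMXOR A N → Spec_SUMXOR A N (SUMXOR A N)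

-- ===== LEMMAS AND PROOFS =====

-- Python's xs[-1] is the last element
theorem pyGetD_neg_one (xs : List Int) (d : Int) :
    PySem.List.pyGetD xs (-1) d = xs.getLastD d := by
  cases xs with
  | nil => simp [PySem.List.pyGetD, PySem.List.pyGet?, PySem.List.pyIdx?]
  | cons a t =>
    simp only [PySem.List.pyGetD, PySem.List.pyGet?, PySem.List.pyIdx?]
    rw [if_neg (by omega), if_pos (by simp)]
    simp [List.getLastD_eq_getLast?, List.getLast?_eq_getElem?]

-- A's branched fold over enumerate equals B's pairwise fold plus a leftover step, two elements at a time
theorem pv_core : ∀ (P : List Int) (m : Nat) (x s : Int),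
    (PySem.List.enumerate P ((2 * m : Nat) : Int)).foldl
      (fun (p : Int × Int) z =>
        if PySem.Int.mod z.1 2 == 0 then (PySem.Int.bxor p.1 z.2, p.2) else (p.1, p.2 + z.2)) (x, s)
    = (let st := (pvPairs P).foldl
         (fun (p : Int × Int) ab => (PySem.Int.bxor p.1 ab.1, p.2 + ab.2)) (x, s)
       if PySem.Int.mod (P.length : Int) 2 ≠ 0 then (PySem.Int.bxor st.1 (PySem.List.pyGetD P (-1) 0), st.2) else st)
  | [], m, x, s => by
    simp [PySem.List.enumerate_nil, pvPairs]
  | [a], m, x, s => by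
    have h1 : PySem.Int.mod ((2 * m : Nat) : Int) 2 = 0 := by
      rw [show ((2:Int)) = ((2:Nat):Int) from rfl, PySem.Int.mod_natCast]
      simp [Nat.mul_mod_right]
    simp only [PySem.List.enumerate_cons, PySem.List.enumerate_nil, List.foldl_cons, List.foldl_nil,
      h1, pvPairs, List.length_cons, List.length_nil]
    rw [pyGetD_neg_one]
    simp
  | a :: b :: t, m, x, s => by
    have h1 : PySem.Int.mod ((2 * m : Nat) : Int) 2 = 0 := by
      rw [show ((2:Int)) = ((2:Nat):Int) from rfl, PySem.Int.mod_natCast]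
      simp [Nat.mul_mod_right]
    have h2 : PySem.Int.mod (((2 * m : Nat) : Int) + 1) 2 = 1 := by
      rw [show (((2 * m : Nat) : Int) + 1) = ((2 * m + 1 : Nat) : Int) by push_cast; ring,
        show ((2:Int)) = ((2:Nat):Int) from rfl, PySem.Int.mod_natCast]
      omega
    have hs : (((2 * m : Nat) : Int) + 1 + 1) = ((2 * (m + 1) : Nat) : Int) := by push_cast; ring
    have ih := pv_core t (m + 1) (PySem.Int.bxor x a) (s + b)
    simp only [PySem.List.enumerate_cons, List.foldl_cons, h1, h2, hs,
      show (((0:Int)) == 0) = true from rfl, show (((1:Int)) == 0) = false from rfl,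
      if_true, Bool.false_eq_true, if_false]
    rw [ih]
    have hmod : PySem.Int.mod (((a :: b :: t).length : Int)) 2 = PySem.Int.mod ((t.length : Int)) 2 := by
      simp only [List.length_cons]
      rw [show ((t.length + 1 + 1 : Nat) : Int) = ((t.length + 2 : Nat) : Int) by push_cast; ring,
        show ((2:Int)) = ((2:Nat):Int) from rfl, PySem.Int.mod_natCast, PySem.Int.mod_natCast]
      omega
    simp only [pvPairs, List.foldl_cons, hmod]
    by_cases hc : PySem.Int.mod ((t.length : Int)) 2 ≠ 0
    · rw [if_pos hc, if_pos hc, pyGetD_neg_one, pyGetD_neg_one]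
      cases t with
      | nil => exact absurd rfl hc
      | cons c t' => simp only [List.getLastD_cons]
    · rw [if_neg hc, if_neg hc]

-- A's index fold over range(N) is the enumerate fold over the clamped prefix
theorem pv_A_to_enum (A : List Int) (N : Int) (h : N ≤ (A.length : Int)) :
    (PySem.List.pyRange 0 N 1).foldl
      (fun (p : Int × Int) i =>
        if PySem.Int.mod i 2 == 0 then (PySem.Int.bxor p.1 (PySem.List.pyGetD A i 0), p.2)
        else (p.1, p.2 + PySem.List.pyGetD A i 0)) (0, 0)
    = (PySem.List.enumerate (A.take (max 0 N).toNat) 0).foldl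
      (fun (p : Int × Int) z =>
        if PySem.Int.mod z.1 2 == 0 then (PySem.Int.bxor p.1 z.2, p.2) else (p.1, p.2 + z.2)) (0, 0) := by
  rcases (by omega : N ≤ 0 ∨ 0 < N) with hN | hN
  · rw [PySem.List.pyRange_one_eq_nil hN, show (max 0 N).toNat = 0 by omega]
    simp [PySem.List.enumerate_nil]
  · have hmax : max 0 N = N := by omega
    have hlen : ((A.take (max 0 N).toNat).length : Int) = N := by
      simp [List.length_take]; omega
    rw [PySem.List.enumerate_eq_map_pyRange (A.take (max 0 N).toNat) 0, PySem.List.len_eq, hlen,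
      List.foldl_map]
    apply PySem.List.foldl_congr_mem
    intro acc j hj
    rw [PySem.List.mem_pyRange_one] at hj
    have hget : PySem.List.pyGetD (A.take (max 0 N).toNat) j 0 = PySem.List.pyGetD A j 0 := by
      rw [PySem.List.pyGetD_eq_getElem _ _ hj.1 (by omega),
          PySem.List.pyGetD_eq_getElem _ _ hj.1 (by omega)]
      exact List.getElem_take
    rw [hget]

-- ===== VERDICT (by name: the statement is the Claim_ definition above) =====
theorem SUMXOR_spec : Claim_equal_SUMXOR := by
  intro A N _ hpre
  show SUMXOR A N = SUMXOR_alt A N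
  have hc := pv_core (A.take (max 0 N).toNat) 0 0 0
  rw [show ((2 * 0 : Nat) : Int) = 0 from rfl] at hc
  simp only [SUMXOR, SUMXOR_alt, PySem.List.slice_to A (le_max_left 0 N)]
  rw [pv_A_to_enum A N hpre, hc]
  split_ifs <;> rfl
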